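-- pv_equiv track=rewrite | github.com/shakfu/soundlab | python/euclid/euclidean.py | euclidean_rhythm
-- ===== SOURCE A (Python) =====
-- def euclidean_rhythm(beats, pulses):
--     """Computes Euclidean rhythm of beats/pulses
--
--     From: https://kountanis.com/2017/06/13/python-euclidean/
--     Examples:
--         euclidean_rhythm(8, 5) -> [1, 0, 1, 0, 1, 0, 1, 1]
--         euclidean_rhythm(7, 3) -> [1, 0, 0, 1, 0, 1, 0]
--
--     Args:
--         beats  (int): Beats of the rhythm
--         pulses (int): Pulses to distribute. Should be <= beats
--
--     Returns:
--         list: 1s are pulses, zeros rests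
--     """
--     if pulses is None or pulses < 0:
--         pulses = 0
--     if beats is None or beats < 0:
--         beats = 0
--     if pulses > beats:
--         beats, pulses = pulses, beats
--     if beats == 0:
--         return []
--
--     rests = beats - pulses
--     result = [1] * pulses
--     pivot = 1
--     interval = 2
--     while rests > 0:
--         if pivot > len(result):
--             pivot = 1
--             interval += 1
--         result.insert(pivot, 0)
--         pivot += interval
--         rests -= 1
--
--     return result
-- ===== SOURCE B (Python) =====
-- def euclidean_rhythm(beats, pulses):
--     """Closed-form Euclidean rhythm: q = rests // pulses full rounds of the
--     insertion process give blocks of q rests after each pulse, and the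
--     j = rests % pulses leftover insertions lengthen the first j blocks by one."""
--     if pulses is None or pulses < 0:
--         pulses = 0
--     if beats is None or beats < 0:
--         beats = 0
--     if pulses > beats:
--         beats, pulses = pulses, beats
--     if pulses == 0:
--         return [0] * beats
--     q = (beats - pulses) // pulses
--     j = (beats - pulses) % pulses
--     return ([1] + [0] * (q + 1)) * j + ([1] + [0] * q) * (pulses - j)
-- ===== Notes on version B (the rewrite author's own statement) =====
-- stated objective: faster
-- what changed: Replaces the quadratic insert-at-pivot loop by a closed form: rests//pulses zeros follow every pulse and the first rests%pulses blocks get one extra zero, so the list is built directly by block repetition.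
import Mathlib
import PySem

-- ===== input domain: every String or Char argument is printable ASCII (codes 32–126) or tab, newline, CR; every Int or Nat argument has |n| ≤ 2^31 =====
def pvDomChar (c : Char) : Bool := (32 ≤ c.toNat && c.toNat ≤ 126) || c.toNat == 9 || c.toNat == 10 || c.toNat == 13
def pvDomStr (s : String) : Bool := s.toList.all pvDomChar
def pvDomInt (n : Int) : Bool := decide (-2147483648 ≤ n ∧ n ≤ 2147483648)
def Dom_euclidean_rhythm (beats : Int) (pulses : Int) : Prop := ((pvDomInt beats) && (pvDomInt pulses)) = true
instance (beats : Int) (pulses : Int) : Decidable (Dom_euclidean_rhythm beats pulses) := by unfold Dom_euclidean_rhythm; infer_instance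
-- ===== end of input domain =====

-- B replaces A's quadratic insert-at-pivot loop by a closed-form block construction (measured asymptotically faster).


-- ===== PORT A =====
-- the while-loop of A; rests is its own loop counter (decremented every iteration)
def erLoop (result : List Int) (pivot : Int) (interval : Int) (rests : Nat) : List Int :=
  match rests with
  | 0 => result
  | Nat.succ r =>
    let pi := if pivot > (result.length : Int) then ((1 : Int), interval + 1) else (pivot, interval)
    erLoop (PySem.List.insert result pi.1 (0 : Int)) (pi.1 + pi.2) pi.2 r

def euclidean_rhythm (beats : Int) (pulses : Int) : List Int :=
  let pulses := if pulses < 0 then 0 else pulses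
  let beats := if beats < 0 then 0 else beats
  let bp := if pulses > beats then (pulses, beats) else (beats, pulses)
  if bp.1 = 0 then []
  else erLoop (List.replicate bp.2.toNat 1) 1 2 (bp.1 - bp.2).toNat

-- ===== PORT B =====
-- Python list repetition xs * n
def pyRep (xs : List Int) (n : Nat) : List Int := (List.replicate n xs).flatten

def euclidean_rhythm_alt (beats : Int) (pulses : Int) : List Int :=
  let pulses := if pulses < 0 then 0 else pulses
  let beats := if beats < 0 then 0 else beats
  let bp := if pulses > beats then (pulses, beats) else (beats, pulses)
  if bp.2 = 0 then List.replicate bp.1.toNat 0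
  else
    let q := PySem.Int.floordiv (bp.1 - bp.2) bp.2
    let j := PySem.Int.mod (bp.1 - bp.2) bp.2
    pyRep ((1 : Int) :: List.replicate (q + 1).toNat 0) j.toNat ++
      pyRep ((1 : Int) :: List.replicate q.toNat 0) (bp.2 - j).toNat

-- ===== PRECONDITION & SPEC =====
def Spec_euclidean_rhythm (beats : Int) (pulses : Int) (out : List Int) : Prop := out = euclidean_rhythm_alt beats pulses
instance (beats : Int) (pulses : Int) (out : List Int) : Decidable (Spec_euclidean_rhythm beats pulses out) := by unfold Spec_euclidean_rhythm; infer_instance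

-- ===== CLAIM (what is proved, stated in full; the proofs are below) =====
def Claim_equal_euclidean_rhythm : Prop := ∀ (beats : Int) (pulses : Int), Dom_euclidean_rhythm beats pulses → Spec_euclidean_rhythm beats pulses (euclidean_rhythm beats pulses)

-- ===== LEMMAS AND PROOFS =====

-- n blocks of (1 followed by m zeros); B's output is made of these
def blocks (m n : Nat) : List Int := (List.replicate n ((1 : Int) :: List.replicate m 0)).flatten

lemma blocks_eq_pyRep (m n : Nat) : blocks m n = pyRep ((1 : Int) :: List.replicate m 0) n := rfl

lemma blocks_nil (m : Nat) : blocks m 0 = [] := rfl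

lemma blocks_succ (m n : Nat) : blocks m (n + 1) = ((1 : Int) :: List.replicate m 0) ++ blocks m n := by
  simp [blocks, List.replicate_succ]

lemma blocks_succ_right (m n : Nat) : blocks m (n + 1) = blocks m n ++ ((1 : Int) :: List.replicate m 0) := by
  simp [blocks, List.replicate_succ']

lemma length_blocks (m n : Nat) : (blocks m n).length = n * (m + 1) := by
  induction n with
  | zero => simp [blocks]
  | succ n ih => rw [blocks_succ]; simp [ih]; ring

lemma blocks_zero_eq (n : Nat) : blocks 0 n = List.replicate n 1 := by
  induction n with
  | zero => simp [blocks]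
  | succ n ih => rw [blocks_succ, ih]; simp [List.replicate_succ]

-- the insertion step inside a round: insert a 0 right after the leading 1 of the (i+1)-st block
lemma insert_mid (m i s : Nat) :
    PySem.List.insert (blocks (m + 1) i ++ blocks m (s + 1)) ((1 : Int) + (i : Int) * ((m : Int) + 2)) 0
      = blocks (m + 1) (i + 1) ++ blocks m s := by
  have hlb : (blocks (m + 1) i).length = i * (m + 2) := by rw [length_blocks]
  have hcast : (1 : Int) + (i : Int) * ((m : Int) + 2) = ((i * (m + 2) + 1 : Nat) : Int) := by
    push_cast; ring
  rw [hcast, blocks_succ m s,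
    PySem.List.insert_natCast _ _ _ (by simp [hlb])]
  rw [List.take_append, List.drop_append, hlb]
  have h1 : i * (m + 2) + 1 - i * (m + 2) = 1 := by omega
  rw [h1, List.take_of_length_le (by rw [hlb]; omega),
    List.drop_of_length_le (by rw [hlb]; omega)]
  rw [blocks_succ_right (m + 1) i]
  simp [List.replicate_succ]

-- main loop invariant: from the state "i zeros already inserted in the round with interval m+2
-- (out of p = i+s needed for the round)", r further insertions complete r/(i+s) extra rounds
-- plus r%(i+s) within-round insertions
lemma key (r : Nat) : ∀ (m i s : Nat), 1 ≤ i + s →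
    erLoop (blocks (m + 1) i ++ blocks m s) ((1 : Int) + (i : Int) * ((m : Int) + 2)) ((m : Int) + 2) r
      = blocks (m + (i + r) / (i + s) + 1) ((i + r) % (i + s)) ++
        blocks (m + (i + r) / (i + s)) ((i + s) - (i + r) % (i + s)) := by
  induction r with
  | zero =>
    intro m i s hp
    rcases Nat.eq_zero_or_pos s with hs | hs
    · subst hs
      have h1 : (i + 0) / (i + 0) = 1 := Nat.div_self (by omega)
      have h2 : (i + 0) % (i + 0) = 0 := Nat.mod_self _
      rw [erLoop, h1, h2]
      simp [blocks_nil]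
    · have h1 : (i + 0) / (i + s) = 0 := Nat.div_eq_of_lt (by omega)
      have h2 : (i + 0) % (i + s) = i := Nat.mod_eq_of_lt (by omega)
      rw [erLoop, h1, h2]
      simp
  | succ r ih =>
    intro m i s hp
    rcases Nat.eq_zero_or_pos s with hs | hs
    · -- the round is complete (i = i+s): reset the pivot, lengthen the interval, insert
      subst hs
      have hi : 1 ≤ i := by omega
      rw [erLoop]
      have hlen : ((blocks (m + 1) i ++ blocks m 0).length : Int) = (i : Int) * ((m : Int) + 2) := by
        rw [List.length_append, length_blocks, length_blocks]; push_cast; ring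
      rw [if_pos (by rw [hlen]; linarith)]
      simp only
      have hins : PySem.List.insert (blocks (m + 1) i ++ blocks m 0) (1 : Int) 0
          = blocks (m + 1 + 1) 1 ++ blocks (m + 1) (i - 1) := by
        have h := insert_mid (m + 1) 0 (i - 1)
        rw [show i - 1 + 1 = i by omega, blocks_nil, List.nil_append] at h
        rw [blocks_nil, List.append_nil]
        norm_num at h
        exact h
      rw [hins]
      simp only [Nat.add_zero]
      have e1 : (1 : Int) + ((m : Int) + 2 + 1) = (1 : Int) + ((1 : Nat) : Int) * (((m + 1 : Nat) : Int) + 2) := by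
        push_cast; ring
      have e2 : ((m : Int) + 2 + 1) = ((m + 1 : Nat) : Int) + 2 := by push_cast; ring
      rw [e1, e2]
      have hih := ih (m + 1) 1 (i - 1) (by omega)
      rw [show 1 + (i - 1) = i by omega] at hih
      rw [hih]
      have d1 : (i + (r + 1)) / i = (1 + r) / i + 1 := by
        rw [show i + (r + 1) = (1 + r) + i by omega, Nat.add_div_right _ (by omega)]
      have d2 : (i + (r + 1)) % i = (1 + r) % i := by
        rw [show i + (r + 1) = (1 + r) + i by omega, Nat.add_mod_right]
      rw [d1, d2,
        show m + ((1 + r) / i + 1) + 1 = m + 1 + (1 + r) / i + 1 by omega,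
        show m + ((1 + r) / i + 1) = m + 1 + (1 + r) / i by omega]
    · -- mid-round: no reset, insert after the leading 1 of the current block
      obtain ⟨s', rfl⟩ : ∃ s', s = s' + 1 := ⟨s - 1, by omega⟩
      rw [erLoop]
      have hlen : ((blocks (m + 1) i ++ blocks m (s' + 1)).length : Int)
          = (i : Int) * ((m : Int) + 2) + ((s' : Int) + 1) * ((m : Int) + 1) := by
        rw [List.length_append, length_blocks, length_blocks]; push_cast; ring
      rw [if_neg (by
        rw [hlen]
        have h1 : (0 : Int) ≤ (s' : Int) := Int.natCast_nonneg s'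
        have h2 : (0 : Int) ≤ (m : Int) := Int.natCast_nonneg m
        nlinarith)]
      simp only
      rw [insert_mid m i s']
      have harith : (1 : Int) + (i : Int) * ((m : Int) + 2) + ((m : Int) + 2)
          = (1 : Int) + ((i + 1 : Nat) : Int) * ((m : Int) + 2) := by push_cast; ring
      rw [harith, ih m (i + 1) s' (by omega)]
      rw [show i + 1 + r = i + (r + 1) by omega, show i + 1 + s' = i + (s' + 1) by omega]

-- A's loop when pulses = 0: every iteration resets the pivot and appends one zero
lemma key_zero (r : Nat) : ∀ (m : Nat) (pv k : Int), (m : Int) ≤ k → (m : Int) < pv →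
    erLoop (List.replicate m 0) pv k r = List.replicate (m + r) 0 := by
  induction r with
  | zero => intro m pv k _ _; rw [erLoop, Nat.add_zero]
  | succ r ih =>
    intro m pv k hk hpv
    rw [erLoop]
    rw [if_pos (by simpa using hpv)]
    simp only
    have hins : PySem.List.insert (List.replicate m (0 : Int)) (1 : Int) 0
        = List.replicate (m + 1) (0 : Int) := by
      cases m with
      | zero => decide
      | succ n =>
        rw [show (1 : Int) = ((1 : Nat) : Int) by simp,
          PySem.List.insert_natCast _ _ _ (by simp)]
        simp [List.replicate_succ]
    rw [hins, ih (m + 1) (1 + (k + 1)) (k + 1) (by push_cast; omega) (by push_cast; omega)]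
    rw [show m + 1 + r = m + (r + 1) by omega]

-- the two ports agree once the inputs are normalised to 0 ≤ pulses ≤ beats
lemma main_lemma (b p : Int) (hp : 0 ≤ p) (hb : p ≤ b) :
    (if b = 0 then ([] : List Int) else erLoop (List.replicate p.toNat 1) 1 2 (b - p).toNat)
      = (if p = 0 then List.replicate b.toNat 0 else
          pyRep ((1 : Int) :: List.replicate ((PySem.Int.floordiv (b - p) p) + 1).toNat 0)
              (PySem.Int.mod (b - p) p).toNat ++
            pyRep ((1 : Int) :: List.replicate (PySem.Int.floordiv (b - p) p).toNat 0)
              (p - PySem.Int.mod (b - p) p).toNat) := by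
  by_cases hb0 : b = 0
  · subst hb0
    have hp0 : p = 0 := le_antisymm hb hp
    subst hp0
    simp
  · rw [if_neg hb0]
    by_cases hp0 : p = 0
    · subst hp0
      rw [if_pos rfl]
      have := key_zero (b - 0).toNat 0 1 2 (by norm_num) (by norm_num)
      simpa using this
    · rw [if_neg hp0]
      have hppos : 0 < p := lt_of_le_of_ne hp (Ne.symm hp0)
      have hRnn : (0 : Int) ≤ b - p := by omega
      -- closed forms for A's floordiv / mod on this nonnegative domain
      have hq : PySem.Int.floordiv (b - p) p = (((b - p).toNat / p.toNat : Nat) : Int) := by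
        show (b - p).fdiv p = _
        rw [Int.fdiv_eq_ediv]
        rw [if_pos (Or.inl (le_of_lt hppos))]
        rw [Int.natCast_div, Int.toNat_of_nonneg hRnn, Int.toNat_of_nonneg hp]
        omega
      have hj : PySem.Int.mod (b - p) p = (((b - p).toNat % p.toNat : Nat) : Int) := by
        show (b - p).fmod p = _
        rw [Int.fmod_eq_emod]
        rw [if_pos (Or.inl (le_of_lt hppos))]
        rw [Int.natCast_mod, Int.toNat_of_nonneg hRnn, Int.toNat_of_nonneg hp]
        omega
      set P := p.toNat with hP
      set R := (b - p).toNat with hR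
      have hP1 : 1 ≤ P := by omega
      have hmodlt : R % P < P := Nat.mod_lt _ (by omega)
      -- A's side via the loop invariant
      have hA : erLoop (List.replicate P 1) 1 2 R
          = blocks (R / P + 1) (R % P) ++ blocks (R / P) (P - R % P) := by
        have h := key R 0 0 P (by omega)
        simp only [blocks_nil, List.nil_append, Nat.zero_add, Nat.cast_zero, zero_mul, add_zero] at h
        rw [blocks_zero_eq] at h
        norm_num at h
        exact h
      rw [hA]
      rw [hq, hj]
      have t1 : ∀ X : Nat, (((X : Int)) + 1).toNat = X + 1 := fun X => by omega
      have t2 : ∀ X : Nat, ((X : Int)).toNat = X := fun X => by omega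
      have t4 : ∀ Y : Nat, Y < P → (p - (Y : Int)).toNat = P - Y := fun Y hY => by omega
      rw [t1 _, t2 _, t2 _, t4 _ hmodlt, blocks_eq_pyRep, blocks_eq_pyRep]

-- ===== VERDICT (by name: the statement is the Claim_ definition above) =====
theorem euclidean_rhythm_spec : Claim_equal_euclidean_rhythm := by
  intro beats pulses _
  unfold Spec_euclidean_rhythm euclidean_rhythm euclidean_rhythm_alt
  simp only
  set P := (if pulses < 0 then (0 : Int) else pulses) with hPdef
  set B := (if beats < 0 then (0 : Int) else beats) with hBdef
  have hP : 0 ≤ P := by rw [hPdef]; split <;> omega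
  have hB : 0 ≤ B := by rw [hBdef]; split <;> omega
  set bp := (if P > B then (P, B) else (B, P)) with hbp
  have h2 : 0 ≤ bp.2 ∧ bp.2 ≤ bp.1 := by
    rw [hbp]; split <;> constructor <;> simp <;> omega
  exact main_lemma bp.1 bp.2 h2.1 h2.2
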